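-- pv_equiv track=rewrite | github.com/nordquant/dbtlearn-snowflake-importer | snowflake_manager.py | get_sql_commands
-- ===== SOURCE A (Python) =====
-- from collections import OrderedDict
--
-- def get_sql_commands(md):
--     commands = OrderedDict()
--     current_section = None
--     in_named_sql = False
--     commands_only = ""
--     for l in md.split("\n"):
--         if in_named_sql:
--             if l.startswith("```"):
--                 in_named_sql = False
--             else:
--                 if l.strip() == "" or l.startswith("--"):
--                     continue
--                 # add command to current section
--                 if current_section not in commands:
--                     commands[current_section] = ""
--                 commands[current_section] += l + "\n"
--         elif l.startswith("```sql {#"):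
--             in_named_sql = True
--             current_section = l.split("{#")[1].split("}")[0]
--     return {
--         k: [c.strip("\n") for c in v.split(";") if c.strip() != ""]
--         for k, v in commands.items()
--     }
-- ===== SOURCE B (Python) =====
-- def _chunks(md):
--     # stage 1: cut the line list at fence lines; chunk k>=1 starts with its fence line
--     chunks = [[]]
--     for l in md.split("\n"):
--         if l.startswith("```"):
--             chunks.append([l])
--         else:
--             chunks[-1].append(l)
--     return chunks
--
--
-- def _body(block_lines):
--     # stage 2 helper: the kept text of one block
--     return "".join(l + "\n" for l in block_lines
--                    if l.strip() != "" and not l.startswith("--"))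
--
--
-- def get_sql_commands(md):
--     # stage 2: alternation over fence chunks -> accumulate one body per named block
--     sections = {}
--     prev_open = False
--     for ch in _chunks(md)[1:]:
--         if prev_open or not ch[0].startswith("```sql {#"):
--             prev_open = False
--             continue
--         prev_open = True
--         name = ch[0].split("{#")[1].split("}")[0]
--         body = _body(ch[1:])
--         if body:
--             sections[name] = sections.get(name, "") + body
--     # stage 3: split each section's text into commands
--     return {k: [c.strip("\n") for c in v.split(";") if c.strip() != ""]
--             for k, v in sections.items()}
-- ===== Notes on version B (the rewrite author's own statement) =====
-- stated objective: alternative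
-- what changed: Replaced A's flat per-line state machine (in_named_sql flag, per-line dict '+=' updates) by staged passes: stage 1 cuts the line list into fence-delimited chunks, stage 2 maps the chunks through an open/close alternation and joins each named block's kept lines into one body string flushed to the dict once per block, stage 3 splits each section text into its command list.
import Mathlib
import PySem

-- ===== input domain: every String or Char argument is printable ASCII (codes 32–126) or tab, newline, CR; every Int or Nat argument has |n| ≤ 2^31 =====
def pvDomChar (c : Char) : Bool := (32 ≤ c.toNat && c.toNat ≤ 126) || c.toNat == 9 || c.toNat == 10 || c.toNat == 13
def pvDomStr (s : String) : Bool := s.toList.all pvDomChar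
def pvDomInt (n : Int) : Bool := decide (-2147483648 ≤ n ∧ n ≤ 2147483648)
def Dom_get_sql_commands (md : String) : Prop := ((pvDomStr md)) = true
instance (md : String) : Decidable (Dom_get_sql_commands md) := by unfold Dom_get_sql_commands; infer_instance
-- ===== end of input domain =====

-- B replaces A's flat per-line state machine by staged passes: cut the line list into
-- fence-delimited chunks, then map chunks through an open/close alternation, joining each
-- block's kept lines at once; same return value.


-- ===== PORT A =====
-- s.split(sep) for a nonempty literal sep: PySem.Str.split? is none only for sep = "",
-- so .getD [] is never the taken branch here (exact).
def pvSplit (s sep : String) : List String := (PySem.Str.split? s sep).getD []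

-- l.split("{#")[1].split("}")[0]; the [1] is guarded by startswith("```sql {#") so it
-- always exists, and [0] of a split always exists; .getD "" is never the taken branch.
def pvNameA (l : String) : String :=
  (PySem.List.pyGet? (pvSplit ((PySem.List.pyGet? (pvSplit l "{#") 1).getD "") "}") 0).getD ""

-- A's loop body; state = (commands, current_section, in_named_sql).
-- current_section starts as Python None, but is only read after a header set it to a
-- string; the never-read initial value is modelled as "".
def pvStepA (st : PySem.Dict String String × String × Bool) (l : String) :
    PySem.Dict String String × String × Bool :=
  if st.2.2 then
    if PySem.Str.startswith l "```" = true then (st.1, st.2.1, false)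
    else if PySem.Str.strip l = "" ∨ PySem.Str.startswith l "--" = true then st
    else
      let d := if st.1.contains st.2.1 then st.1 else st.1.insert st.2.1 ""
      (d.insert st.2.1 (d.getD st.2.1 "" ++ l ++ "\n"), st.2.1, true)
  else if PySem.Str.startswith l "```sql {#" = true then (st.1, pvNameA l, true)
  else st

-- A's final dict comprehension
def pvPostA (d : PySem.Dict String String) : List (String × List String) :=
  d.items.map (fun kv =>
    (kv.1, ((pvSplit kv.2 ";").filter
              (fun c => PySem.Str.strip c ≠ "")).map (fun c => PySem.Str.stripChars c "\n")))

def get_sql_commands (md : String) : List (String × List String) :=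
  pvPostA (((pvSplit md "\n").foldl pvStepA (PySem.Dict.empty, "", false)).1)

-- ===== PORT B =====
-- Source B stage 1 (_chunks): state = (chunks[:-1], chunks[-1]); append l as a new chunk at a
-- fence line, else append l to the last chunk
def pvChunkStep (st : List (List String) × List String) (l : String) :
    List (List String) × List String :=
  if PySem.Str.startswith l "```" = true then (st.1 ++ [st.2], [l]) else (st.1, st.2 ++ [l])

def pvChunks (lines : List String) : List (List String) :=
  let st := lines.foldl pvChunkStep ([], [])
  st.1 ++ [st.2]

def pvNameB (l : String) : String :=
  (PySem.List.pyGet? (pvSplit ((PySem.List.pyGet? (pvSplit l "{#") 1).getD "") "}") 0).getD ""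

-- Source B's _body: "".join(l + "\n" for kept l)
def pvBodyStep (acc l : String) : String :=
  if PySem.Str.strip l ≠ "" ∧ PySem.Str.startswith l "--" = false then acc ++ l ++ "\n" else acc

def pvBody (ls : List String) : String := ls.foldl pvBodyStep ""

-- 'if body: sections[name] = sections.get(name, "") + body'
def pvFlush (c : PySem.Dict String String) (k b : String) : PySem.Dict String String :=
  if b ≠ "" then c.insert k (c.getD k "" ++ b) else c

-- Source B stage 2 loop body; state = (sections, prev_open). ch[0]: every chunk folded over
-- starts with its fence line, so it is nonempty and .getD "" is never the taken branch.
def pvStepB (st : PySem.Dict String String × Bool) (ch : List String) :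
    PySem.Dict String String × Bool :=
  let h := (PySem.List.pyGet? ch 0).getD ""
  if st.2 || !(PySem.Str.startswith h "```sql {#") then (st.1, false)
  else (pvFlush st.1 (pvNameB h) (pvBody (PySem.List.slice ch (some 1) none)), true)

-- Source B's final dict comprehension (textually the same as A's)
def pvPostB (d : PySem.Dict String String) : List (String × List String) :=
  d.items.map (fun kv =>
    (kv.1, ((pvSplit kv.2 ";").filter
              (fun c => PySem.Str.strip c ≠ "")).map (fun c => PySem.Str.stripChars c "\n")))

def get_sql_commands_alt (md : String) : List (String × List String) :=
  pvPostB ((PySem.List.slice (pvChunks (pvSplit md "\n")) (some 1) none).foldl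
             pvStepB (PySem.Dict.empty, false)).1

-- ===== PRECONDITION & SPEC =====
def Spec_get_sql_commands (md : String) (out : List (String × List String)) : Prop := out = get_sql_commands_alt md
instance (md : String) (out : List (String × List String)) : Decidable (Spec_get_sql_commands md out) := by unfold Spec_get_sql_commands; infer_instance

-- ===== CLAIM (what is proved, stated in full; the proofs are below) =====
def Claim_equal_get_sql_commands : Prop := ∀ (md : String), Dom_get_sql_commands md → Spec_get_sql_commands md (get_sql_commands md)

-- ===== LEMMAS AND PROOFS =====

theorem pvBoolNe {x : Bool} (h : x = false) : ¬ (x = true) := by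
  simp [h]

theorem pvAppend_ne_empty (b l : String) : b ++ l ++ "\n" ≠ "" := by
  intro h
  have := congrArg String.length h
  simp at this

-- a "```sql {#" header line is in particular a "```" fence line
theorem pvHeader_fence (l : String)
    (h : PySem.Str.startswith l "```sql {#" = true) :
    PySem.Str.startswith l "```" = true := by
  rw [PySem.Str.startswith_eq, PySem.Chars.startswith_iff] at h ⊢
  exact List.IsPrefix.trans (by decide) h

-- recursive re-statement of stage 1: (lines before the first fence, fence-led chunks)
def pvChR : List String → List String × List (List String)
  | [] => ([], [])
  | l :: rest =>
    if PySem.Str.startswith l "```" = true then ([], (l :: (pvChR rest).1) :: (pvChR rest).2)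
    else (l :: (pvChR rest).1, (pvChR rest).2)

theorem pvChR_fence (l : String) (rest : List String)
    (hf : PySem.Str.startswith l "```" = true) :
    pvChR (l :: rest) = ([], (l :: (pvChR rest).1) :: (pvChR rest).2) := by
  simp only [pvChR]; rw [if_pos hf]

theorem pvChR_plain (l : String) (rest : List String)
    (hf : PySem.Str.startswith l "```" = false) :
    pvChR (l :: rest) = (l :: (pvChR rest).1, (pvChR rest).2) := by
  simp only [pvChR]; rw [if_neg (pvBoolNe hf)]

theorem pvChunkStep_fence (st : List (List String) × List String) (l : String)
    (hf : PySem.Str.startswith l "```" = true) :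
    pvChunkStep st l = (st.1 ++ [st.2], [l]) := by
  simp only [pvChunkStep]; rw [if_pos hf]

theorem pvChunkStep_plain (st : List (List String) × List String) (l : String)
    (hf : PySem.Str.startswith l "```" = false) :
    pvChunkStep st l = (st.1, st.2 ++ [l]) := by
  simp only [pvChunkStep]; rw [if_neg (pvBoolNe hf)]

theorem pvChunkFold (lines : List String) : ∀ (done : List (List String)) (cur : List String),
    (lines.foldl pvChunkStep (done, cur)).1 ++ [(lines.foldl pvChunkStep (done, cur)).2]
      = done ++ [cur ++ (pvChR lines).1] ++ (pvChR lines).2 := by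
  induction lines with
  | nil => intro done cur; simp [pvChR]
  | cons l rest ih =>
    intro done cur
    rw [List.foldl_cons]
    by_cases hf : PySem.Str.startswith l "```" = true
    · rw [pvChunkStep_fence (done, cur) l hf, ih, pvChR_fence l rest hf]
      simp
    · have hf' : PySem.Str.startswith l "```" = false := by simpa using hf
      rw [pvChunkStep_plain (done, cur) l hf', ih, pvChR_plain l rest hf']
      simp

theorem pvChunks_eq (lines : List String) :
    pvChunks lines = (pvChR lines).1 :: (pvChR lines).2 := by
  have := pvChunkFold lines [] []
  simpa [pvChunks] using this

-- equation lemmas for A's step in each of its five branches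
theorem pvStepA_header (c : PySem.Dict String String) (k l : String)
    (hh : PySem.Str.startswith l "```sql {#" = true) :
    pvStepA (c, k, false) l = (c, pvNameA l, true) := by
  show (if false = true then _ else _) = _
  rw [if_neg Bool.false_ne_true, if_pos hh]

theorem pvStepA_plain (c : PySem.Dict String String) (k l : String)
    (hh : PySem.Str.startswith l "```sql {#" = false) :
    pvStepA (c, k, false) l = (c, k, false) := by
  show (if false = true then _ else _) = _
  rw [if_neg Bool.false_ne_true, if_neg (pvBoolNe hh)]

theorem pvStepA_fence (c : PySem.Dict String String) (k l : String)
    (hf : PySem.Str.startswith l "```" = true) :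
    pvStepA (c, k, true) l = (c, k, false) := by
  show (if true = true then _ else _) = _
  rw [if_pos rfl, if_pos hf]

theorem pvStepA_skip (c : PySem.Dict String String) (k l : String)
    (hf : PySem.Str.startswith l "```" = false)
    (hs : PySem.Str.strip l = "" ∨ PySem.Str.startswith l "--" = true) :
    pvStepA (c, k, true) l = (c, k, true) := by
  show (if true = true then _ else _) = _
  rw [if_pos rfl, if_neg (pvBoolNe hf), if_pos hs]

-- A's per-kept-line dict update advances pvFlush by one line
theorem pvFlush_step (c : PySem.Dict String String) (k b l : String) :
    (if (pvFlush c k b).contains k then pvFlush c k b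
     else (pvFlush c k b).insert k "").insert k
      ((if (pvFlush c k b).contains k then pvFlush c k b
        else (pvFlush c k b).insert k "").getD k "" ++ l ++ "\n")
    = pvFlush c k (b ++ l ++ "\n") := by
  by_cases hb : b = ""
  · subst hb
    rw [show pvFlush c k "" = c from by simp [pvFlush]]
    by_cases hc : c.contains k = true
    · rw [if_pos hc, pvFlush, if_pos (pvAppend_ne_empty "" l), String.empty_append,
        String.append_assoc]
    · have hc' : c.contains k = false := by simpa using hc
      rw [if_neg (by simp [hc']), PySem.Dict.getD_insert_self, PySem.Dict.insert_insert_self,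
        pvFlush, if_pos (pvAppend_ne_empty "" l),
        PySem.Dict.getD_of_not_contains c "" hc', String.empty_append, String.empty_append]
  · rw [show pvFlush c k b = c.insert k (c.getD k "" ++ b) from by rw [pvFlush, if_pos hb],
      if_pos (PySem.Dict.contains_insert_self c k _), PySem.Dict.getD_insert_self,
      PySem.Dict.insert_insert_self, pvFlush, if_pos (pvAppend_ne_empty b l),
      String.append_assoc, String.append_assoc,
      show b ++ l ++ "\n" = b ++ (l ++ "\n") from String.append_assoc]

theorem pvStepA_keep (c : PySem.Dict String String) (k b l : String)
    (hf : PySem.Str.startswith l "```" = false)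
    (hs : ¬ (PySem.Str.strip l = "" ∨ PySem.Str.startswith l "--" = true)) :
    pvStepA (pvFlush c k b, k, true) l = (pvFlush c k (b ++ l ++ "\n"), k, true) := by
  show (if true = true then _ else _) = _
  rw [if_pos rfl, if_neg (pvBoolNe hf), if_neg hs]
  exact congrArg (fun x => (x, k, true)) (pvFlush_step c k b l)

-- equation lemmas for B's stage-2 step on a fence-led chunk
theorem pvStepB_closed (c : PySem.Dict String String) (ch : List String) :
    pvStepB (c, true) ch = (c, false) := by
  simp [pvStepB]

theorem pvStepB_plain (c : PySem.Dict String String) (l : String) (tl : List String)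
    (hh : PySem.Str.startswith l "```sql {#" = false) :
    pvStepB (c, false) (l :: tl) = (c, false) := by
  have hh' : PySem.Chars.startswith l.toList ['`','`','`','s','q','l',' ','{','#'] = false := by
    simpa using hh
  simp [pvStepB, PySem.List.pyGet?, PySem.List.pyIdx?, hh']

theorem pvStepB_open (c : PySem.Dict String String) (l : String) (tl : List String)
    (hh : PySem.Str.startswith l "```sql {#" = true) :
    pvStepB (c, false) (l :: tl) = (pvFlush c (pvNameB l) (pvBody tl), true) := by
  have hh' : PySem.Chars.startswith l.toList ['`','`','`','s','q','l',' ','{','#'] = true := by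
    simpa using hh
  simp [pvStepB, PySem.List.pyGet?, PySem.List.pyIdx?, hh',
    PySem.List.slice_from (l :: tl) (by norm_num : (0:Int) ≤ 1)]

-- the kept/skip equations of Source B's body fold
theorem pvBodyStep_keep (acc l : String)
    (hk : PySem.Str.strip l ≠ "" ∧ PySem.Str.startswith l "--" = false) :
    pvBodyStep acc l = acc ++ l ++ "\n" := by
  rw [pvBodyStep, if_pos hk]

theorem pvBodyStep_skip (acc l : String)
    (hk : ¬ (PySem.Str.strip l ≠ "" ∧ PySem.Str.startswith l "--" = false)) :
    pvBodyStep acc l = acc := by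
  rw [pvBodyStep, if_neg hk]

-- joint induction: outside a block A's fold agrees with B's fold over the remaining
-- fence-led chunks; inside a block (buffer b already flushed on A's side) A's fold agrees
-- with B's fold after flushing the block's total body at once.
theorem pvMain (lines : List String) :
    (∀ (c : PySem.Dict String String) (k : String),
        (lines.foldl pvStepA (c, k, false)).1
          = ((pvChR lines).2.foldl pvStepB (c, false)).1) ∧
    (∀ (c : PySem.Dict String String) (k b : String),
        (lines.foldl pvStepA (pvFlush c k b, k, true)).1
          = ((pvChR lines).2.foldl pvStepB
              (pvFlush c k ((pvChR lines).1.foldl pvBodyStep b), true)).1) := by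
  induction lines with
  | nil =>
    refine ⟨fun c k => rfl, fun c k b => rfl⟩
  | cons l rest ih =>
    refine ⟨fun c k => ?_, fun c k b => ?_⟩
    · rw [List.foldl_cons]
      by_cases hh : PySem.Str.startswith l "```sql {#" = true
      · have hf := pvHeader_fence l hh
        rw [pvStepA_header c k l hh]
        have := ih.2 c (pvNameA l) ""
        rw [show pvFlush c (pvNameA l) "" = c from by simp [pvFlush]] at this
        rw [this, pvChR_fence l rest hf, List.foldl_cons,
          pvStepB_open c l (pvChR rest).1 hh]
        rfl
      · have hh' : PySem.Str.startswith l "```sql {#" = false := by simpa using hh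
        rw [pvStepA_plain c k l hh', ih.1 c k]
        by_cases hf : PySem.Str.startswith l "```" = true
        · rw [pvChR_fence l rest hf, List.foldl_cons, pvStepB_plain c l (pvChR rest).1 hh']
        · have hf' : PySem.Str.startswith l "```" = false := by simpa using hf
          rw [pvChR_plain l rest hf']
    · rw [List.foldl_cons]
      by_cases hf : PySem.Str.startswith l "```" = true
      · rw [pvStepA_fence _ _ _ hf, ih.1 (pvFlush c k b) k, pvChR_fence l rest hf,
          List.foldl_cons, pvStepB_closed]
        rfl
      · have hf' : PySem.Str.startswith l "```" = false := by simpa using hf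
        by_cases hk : PySem.Str.strip l ≠ "" ∧ PySem.Str.startswith l "--" = false
        · rw [pvStepA_keep c k b l hf' (by
              intro hor
              rcases hor with h | h
              · exact hk.1 h
              · rw [hk.2] at h; cases h),
            ih.2 c k (b ++ l ++ "\n"), pvChR_plain l rest hf', List.foldl_cons,
            pvBodyStep_keep b l hk]
        · have hs : PySem.Str.strip l = "" ∨ PySem.Str.startswith l "--" = true := by
            by_cases h1 : PySem.Str.strip l = ""
            · exact Or.inl h1
            · refine Or.inr ?_
              by_cases h2 : PySem.Str.startswith l "--" = true
              · exact h2
              · exact absurd ⟨h1, by simpa using h2⟩ hk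
          rw [pvStepA_skip _ _ _ hf' hs, ih.2 c k b, pvChR_plain l rest hf',
            List.foldl_cons, pvBodyStep_skip b l hk]

-- ===== VERDICT (by name: the statement is the Claim_ definition above) =====
theorem get_sql_commands_spec : Claim_equal_get_sql_commands := by
  intro md _
  show get_sql_commands md = get_sql_commands_alt md
  unfold get_sql_commands get_sql_commands_alt
  rw [pvChunks_eq,
    PySem.List.slice_from ((pvChR (pvSplit md "\n")).1 :: (pvChR (pvSplit md "\n")).2)
      (by norm_num : (0:Int) ≤ 1)]
  rw [(pvMain (pvSplit md "\n")).1 PySem.Dict.empty ""]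
  rfl
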